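-- pv_equiv track=rewrite | github.com/johnklee/algprac | hackerrank/strings/easy/two-strings.py | twoStrings_v1
-- ===== SOURCE A (Python) =====
-- def twoStrings_v1(s1, s2):
--     if len(s1) == 0 or len(s2) == 0:
--         return 'NO'
--
--     cset= set()
--     for c in s1:
--         cset.add(c)
--
--     for c in s2:
--         cset.add(c)
--
--     return 'YES' if len(s1) + len(s2) != len(cset) else 'NO'
-- ===== SOURCE B (Python) =====
-- def twoStrings_v1(s1, s2):
--     # Sort-then-scan: after sorting the combined characters, any repeated
--     # character becomes adjacent, so one pairwise pass over the sorted list decides.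
--     if not s1 or not s2:
--         return 'NO'
--     chars = sorted(s1 + s2)
--     for i in range(1, len(chars)):
--         if chars[i] == chars[i - 1]:
--             return 'YES'
--     return 'NO'
-- ===== Notes on version B (the rewrite author's own statement) =====
-- stated objective: alternative
-- what changed: Replaces the hash-set union and size comparison with a sort of the concatenated characters followed by an adjacent-pair scan for a duplicate (no set at all).
import Mathlib
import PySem

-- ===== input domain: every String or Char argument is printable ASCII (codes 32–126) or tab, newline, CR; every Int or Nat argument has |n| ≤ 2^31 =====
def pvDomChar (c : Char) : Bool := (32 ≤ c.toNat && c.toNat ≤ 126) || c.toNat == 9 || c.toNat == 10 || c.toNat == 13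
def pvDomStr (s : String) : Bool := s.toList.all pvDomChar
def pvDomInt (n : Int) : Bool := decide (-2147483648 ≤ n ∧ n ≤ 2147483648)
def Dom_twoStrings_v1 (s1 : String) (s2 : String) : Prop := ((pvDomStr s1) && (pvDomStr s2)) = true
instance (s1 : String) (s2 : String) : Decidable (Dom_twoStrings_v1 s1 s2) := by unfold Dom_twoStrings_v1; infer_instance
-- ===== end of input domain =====

-- B replaces A's set-union-and-size-comparison by sorting the concatenated characters and
-- scanning adjacent pairs for a duplicate (objective: alternative; same return value everywhere).

-- ===== PORT A =====
def twoStrings_v1 (s1 : String) (s2 : String) : String :=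
  if PySem.Str.len s1 = 0 ∨ PySem.Str.len s2 = 0 then "NO"
  else
    let cset0 : PySem.Set Char := s1.toList.foldl PySem.Set.add PySem.Set.empty
    let cset : PySem.Set Char := s2.toList.foldl PySem.Set.add cset0
    if PySem.Str.len s1 + PySem.Str.len s2 ≠ PySem.List.len cset then "YES" else "NO"

-- ===== PORT B =====
-- the 'for i in range(1, len(chars)): if chars[i] == chars[i-1] …' adjacent-pair scan,
-- as structural recursion over consecutive elements of the sorted list
def pvAdj : List Char → String
  | a :: b :: rest => if a == b then "YES" else pvAdj (b :: rest)
  | _ => "NO"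

def twoStrings_v1_alt (s1 : String) (s2 : String) : String :=
  if s1.toList.isEmpty || s2.toList.isEmpty then "NO"
  else pvAdj (PySem.List.sorted (s1.toList ++ s2.toList) (fun x => x) false)

-- ===== PRECONDITION & SPEC =====
def Spec_twoStrings_v1 (s1 : String) (s2 : String) (out : String) : Prop := out = twoStrings_v1_alt s1 s2
instance (s1 : String) (s2 : String) (out : String) : Decidable (Spec_twoStrings_v1 s1 s2 out) := by unfold Spec_twoStrings_v1; infer_instance

-- ===== CLAIM (what is proved, stated in full; the proofs are below) =====
def Claim_equal_twoStrings_v1 : Prop := ∀ (s1 : String) (s2 : String), Dom_twoStrings_v1 s1 s2 → Spec_twoStrings_v1 s1 s2 (twoStrings_v1 s1 s2)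

-- ===== LEMMAS AND PROOFS =====

-- A side: the built union set has full length iff the char list has no duplicates
theorem ofList_len_le (l : List Char) : (PySem.Set.ofList l).length ≤ l.length := by
  induction l using List.reverseRecOn with
  | nil => simp [PySem.Set.ofList]
  | append_singleton l a ih =>
      have h : PySem.Set.ofList (l ++ [a]) = PySem.Set.add (PySem.Set.ofList l) a := by
        simp [PySem.Set.ofList_eq_foldl, List.foldl_append]
      rw [h, PySem.Set.add_eq_ite]
      split
      · simpa using Nat.le_trans ih (by simp)
      · simpa using ih

theorem ofList_len_eq_iff (l : List Char) :
    (PySem.Set.ofList l).length = l.length ↔ l.Nodup := by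
  induction l using List.reverseRecOn with
  | nil => simp [PySem.Set.ofList]
  | append_singleton l a ih =>
      have h : PySem.Set.ofList (l ++ [a]) = PySem.Set.add (PySem.Set.ofList l) a := by
        simp [PySem.Set.ofList_eq_foldl, List.foldl_append]
      rw [h, PySem.Set.add_eq_ite]
      by_cases hm : a ∈ l
      · rw [if_pos (by simpa [PySem.Set.contains_iff, PySem.Set.mem_ofList] using hm)]
        have hle := ofList_len_le l
        simp only [List.length_append, List.length_singleton]
        constructor
        · intro hlen; omega
        · intro hnd
          exact ((List.disjoint_of_nodup_append hnd) hm (by simp)).elim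
      · rw [if_neg (by simpa [PySem.Set.contains_iff, PySem.Set.mem_ofList] using hm)]
        simp only [List.length_append, List.length_singleton]
        rw [List.nodup_append]
        constructor
        · intro hlen
          refine ⟨ih.mp (by omega), List.nodup_singleton a, ?_⟩
          intro x hx b hb hxb
          have hbe : b = a := by simpa using hb
          subst hbe; subst hxb; exact hm hx
        · rintro ⟨hnd, -, -⟩
          have := ih.mpr hnd; omega

-- B side: on a (≤)-sorted list the adjacent scan says "NO" exactly when there is no duplicate
theorem pvAdj_no_iff (m : List Char) (hs : m.Pairwise (· ≤ ·)) :
    pvAdj m = "NO" ↔ m.Nodup := by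
  induction m with
  | nil => simp [pvAdj]
  | cons a t ih =>
      cases t with
      | nil => simp [pvAdj]
      | cons b rest =>
          simp only [pvAdj]
          rw [List.pairwise_cons] at hs
          by_cases hab : a = b
          · subst hab
            rw [if_pos (by simp)]
            constructor
            · intro h; exact absurd h (by decide)
            · intro hnd
              exfalso
              have := (List.nodup_cons.mp hnd).1
              simp at this
          · rw [if_neg (by simpa using hab)]
            rw [ih hs.2]
            have hlt : a < b := lt_of_le_of_ne (hs.1 b List.mem_cons_self) hab
            constructor
            · intro hnd
              rw [List.nodup_cons]
              refine ⟨?_, hnd⟩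
              intro hmem
              rcases List.mem_cons.mp hmem with h | h
              · exact hab h
              · have hb := (List.pairwise_cons.mp hs.2).1 a h
                exact absurd (lt_of_lt_of_le hlt hb) (lt_irrefl a)
            · intro hnd; exact (List.nodup_cons.mp hnd).2

theorem pvAdj_yes_or_no (m : List Char) : pvAdj m = "YES" ∨ pvAdj m = "NO" := by
  induction m with
  | nil => right; rfl
  | cons a t ih =>
      cases t with
      | nil => right; rfl
      | cons b rest =>
          simp only [pvAdj]
          split
          · left; rfl
          · exact ih

-- ===== VERDICT (by name: the statement is the Claim_ definition above) =====
theorem twoStrings_v1_spec : Claim_equal_twoStrings_v1 := by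
  intro s1 s2 _
  unfold Spec_twoStrings_v1 twoStrings_v1 twoStrings_v1_alt
  by_cases h1 : s1 = ""
  · simp [PySem.Str.len_eq, h1]
  by_cases h2 : s2 = ""
  · simp [PySem.Str.len_eq, h2]
  have g1 : ¬ (PySem.Str.len s1 = 0 ∨ PySem.Str.len s2 = 0) := by
    simp [PySem.Str.len_eq, h1, h2]
  have g2 : ¬ ((s1.toList.isEmpty || s2.toList.isEmpty) = true) := by
    simp [h1, h2]
  rw [if_neg g1, if_neg g2]
  set l := s1.toList ++ s2.toList with hl
  have hfold : s2.toList.foldl PySem.Set.add (s1.toList.foldl PySem.Set.add PySem.Set.empty)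
      = PySem.Set.ofList l := by
    simp [PySem.Set.ofList_eq_foldl, hl, List.foldl_append, PySem.Set.empty]
  simp only [hfold]
  set m := PySem.List.sorted l (fun x => x) false with hm
  have hperm : m.Perm l := PySem.List.sorted_perm l (fun x => x) false
  have hpw : m.Pairwise (· ≤ ·) := by
    have := PySem.List.sorted_pairwise l (fun x => x)
    simpa using this
  have hiff := pvAdj_no_iff m hpw
  have hlen : PySem.Str.len s1 + PySem.Str.len s2 = (l.length : Int) := by
    simp [PySem.Str.len_eq, hl]
  rcases pvAdj_yes_or_no m with hy | hn
  · have hc : PySem.Str.len s1 + PySem.Str.len s2 ≠ PySem.List.len (PySem.Set.ofList l) := by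
      intro hEq
      rw [PySem.List.len_eq, hlen] at hEq
      have hnd : l.Nodup := (ofList_len_eq_iff l).mp (by exact_mod_cast hEq.symm)
      have hno : pvAdj m = "NO" := hiff.mpr (hperm.nodup_iff.mpr hnd)
      rw [hy] at hno; exact absurd hno (by decide)
    rw [if_pos hc, hy]
  · have hnd : l.Nodup := hperm.nodup_iff.mp (hiff.mp hn)
    have hset := (ofList_len_eq_iff l).mpr hnd
    have hc : ¬ (PySem.Str.len s1 + PySem.Str.len s2 ≠ PySem.List.len (PySem.Set.ofList l)) := by
      rw [PySem.List.len_eq, hlen, hset]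
      simp
    rw [if_neg hc, hn]
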